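-- pv_equiv track=rewrite | github.com/andersonburrus-byte/Rhymegen | scripts/convert_expanded_corpus.py | split_compound
-- ===== SOURCE A (Python) =====
-- def split_compound(word, lookup, memo=None):
--     """Recursively try to split word into known sub-words."""
--     if memo is None:
--         memo = {}
--     if word in memo:
--         return memo[word]
--     if word in lookup:
--         memo[word] = lookup[word]
--         return lookup[word]
--     # Try all split points (min 2 chars each side)
--     for i in range(2, len(word) - 1):
--         left = word[:i]
--         right = word[i:]
--         if left in lookup:
--             right_ph = split_compound(right, lookup, memo)
--             if right_ph is not None:
--                 result = lookup[left] + right_ph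
--                 memo[word] = result
--                 return result
--     memo[word] = None
--     return None
-- ===== SOURCE B (Python) =====
-- def split_compound(word, lookup, memo=None):
--     """Bottom-up DP over the suffixes of word (return value only: unlike the
--     recursive original, this does not write entries into a caller-passed memo;
--     it reads memo first, like the original does for every suffix it visits).
--     Split offsets are scanned over the sorted set of dictionary key lengths."""
--     if memo is None:
--         memo = {}
--     n = len(word)
--     js = sorted({len(k) for k in lookup if len(k) >= 2})
--     best = [None] * (n + 1)
--     for i in range(n, -1, -1):
--         suf = word[i:]
--         if suf in memo:
--             best[i] = memo[suf]
--         elif suf in lookup: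
--             best[i] = lookup[suf]
--         else:
--             res = None
--             for j in js:
--                 if j > n - i - 2:
--                     break
--                 left = word[i:i + j]
--                 if left in lookup and best[i + j] is not None:
--                     res = lookup[left] + best[i + j]
--                     break
--             best[i] = res
--     return best[0]
-- ===== Notes on version B (the rewrite author's own statement) =====
-- stated objective: alternative
-- what changed: Replaces the top-down recursion with memoization by an iterative bottom-up dynamic program that fills an array of answers over the suffixes of word from the end toward the front, trying only split offsets that occur as dictionary key lengths (sorted, with an early break) instead of every offset; B reads a caller-passed memo but does not mutate it (return values are identical).
import Mathlib
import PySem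

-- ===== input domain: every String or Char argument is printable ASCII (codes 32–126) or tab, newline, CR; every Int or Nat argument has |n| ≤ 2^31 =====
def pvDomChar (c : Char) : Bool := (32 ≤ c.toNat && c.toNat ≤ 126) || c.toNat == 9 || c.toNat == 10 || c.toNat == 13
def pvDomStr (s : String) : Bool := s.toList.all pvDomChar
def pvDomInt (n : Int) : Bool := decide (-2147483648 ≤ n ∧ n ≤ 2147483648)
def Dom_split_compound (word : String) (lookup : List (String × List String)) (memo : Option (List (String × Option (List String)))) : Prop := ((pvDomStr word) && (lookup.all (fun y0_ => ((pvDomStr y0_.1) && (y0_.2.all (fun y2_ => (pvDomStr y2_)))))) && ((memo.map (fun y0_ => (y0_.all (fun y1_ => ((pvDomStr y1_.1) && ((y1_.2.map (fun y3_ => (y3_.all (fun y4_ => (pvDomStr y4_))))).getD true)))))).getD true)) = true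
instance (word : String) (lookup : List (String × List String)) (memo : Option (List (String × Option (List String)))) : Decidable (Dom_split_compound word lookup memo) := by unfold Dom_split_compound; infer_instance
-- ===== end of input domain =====

-- B replaces A's memoized top-down recursion by a bottom-up DP over the suffixes of word
-- (return-value equivalence only: A writes into a caller-passed memo dict, B does not).


-- ===== PORT A =====
-- A's recursion, fuel-guarded for totality only: the initial fuel w.length + 1 strictly
-- dominates the recursion depth (each recursive call drops at least 2 characters), so the
-- fuel-0 branch is never reached on the actual call.  Dicts (memo, lookup) are association
-- lists with first-match lookup (List.lookup); A only ever assigns memo[word] when word is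
-- absent, so Python's dict assignment is exactly an append.
mutual
def splitA (fuel : Nat) (w : List Char) (lookup : List (String × List String))
    (memo : List (String × Option (List String))) :
    Option (List String) × List (String × Option (List String)) :=
  match fuel with
  | 0 => (none, memo)
  | fuel + 1 =>
    match List.lookup (String.ofList w) memo with
    | some v => (v, memo)                                  -- if word in memo: return memo[word]
    | none =>
      match List.lookup (String.ofList w) lookup with
      | some v => (some v, memo ++ [(String.ofList w, some v)])  -- if word in lookup
      | none => loopA fuel w lookup memo (PySem.List.pyRange 2 ((w.length : Int) - 1) 1)
termination_by (fuel, 0)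

def loopA (fuel : Nat) (w : List Char) (lookup : List (String × List String))
    (memo : List (String × Option (List String))) :
    List Int → Option (List String) × List (String × Option (List String))
  | [] => (none, memo ++ [(String.ofList w, none)])            -- memo[word] = None; return None
  | i :: rest =>
    -- i ∈ range(2, len(word)-1) so 2 ≤ i: word[:i] = take i.toNat, word[i:] = drop i.toNat exactly
    let left := w.take i.toNat
    let right := w.drop i.toNat
    match List.lookup (String.ofList left) lookup with
    | none => loopA fuel w lookup memo rest
    | some lv =>
      match splitA fuel right lookup memo with
      | (r, memo') =>
        match r with
        | some ph => (some (lv ++ ph), memo' ++ [(String.ofList w, some (lv ++ ph))])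
        | none => loopA fuel w lookup memo' rest
termination_by is => (fuel, is.length + 1)
end

def split_compound (word : String) (lookup : List (String × List String))
    (memo : Option (List (String × Option (List String)))) : Option (List String) :=
  (splitA (word.toList.length + 1) word.toList lookup (memo.getD [])).1

-- ===== PORT B =====
-- js = sorted({len(k) for k in lookup if len(k) >= 2}) — the split offsets worth trying
def jsB (lookup : List (String × List String)) : List Int :=
  PySem.List.sorted
    (PySem.Set.ofList ((lookup.filter (fun p => 2 ≤ PySem.Str.len p.1)).map
      (fun p => PySem.Str.len p.1)))
    (fun x => x) false

-- B's inner scan: offsets j from js in increasing order, break once j > len(suf)-2;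
-- first j whose left part is a known word and whose remainder (looked up in the
-- already-filled tail of `best`) splits.
def scanB (lookup : List (String × List String)) (suf : List Char)
    (b : List (Option (List String))) : List Int → Option (List String)
  | [] => none
  | j :: rest =>
    if (suf.length : Int) - 2 < j then none            -- if j > n - i - 2: break
    else
      -- 2 ≤ j for every j ∈ js, so word[i:i+j] = take j.toNat is exact
      match List.lookup (String.ofList (suf.take j.toNat)) lookup with
      | some lv =>
        -- best[i+j]: j-1 is a nonnegative in-range index into b, so getD is exact
        match b.getD (j.toNat - 1) none with
        | some ph => some (lv ++ ph)
        | none => scanB lookup suf b rest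
      | none => scanB lookup suf b rest

-- one cell of B's `best` array: memo first, then whole-suffix lookup, then the scan
def entryB (memo0 : List (String × Option (List String)))
    (lookup : List (String × List String)) (js : List Int) (suf : List Char)
    (b : List (Option (List String))) : Option (List String) :=
  match List.lookup (String.ofList suf) memo0 with
  | some v => v
  | none =>
    match List.lookup (String.ofList suf) lookup with
    | some v => some v
    | none => scanB lookup suf b js

-- B's array fill, from the end of the word toward the front (best[i] for every suffix)
def bestB (memo0 : List (String × Option (List String)))
    (lookup : List (String × List String)) (js : List Int) :
    List Char → List (Option (List String))
  | [] => [entryB memo0 lookup js [] []]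
  | c :: rest =>
    let b := bestB memo0 lookup js rest
    entryB memo0 lookup js (c :: rest) b :: b

def split_compound_alt (word : String) (lookup : List (String × List String))
    (memo : Option (List (String × Option (List String)))) : Option (List String) :=
  (bestB (memo.getD []) lookup (jsB lookup) word.toList).headD none     -- best[0]

-- ===== PRECONDITION & SPEC =====
def Spec_split_compound (word : String) (lookup : List (String × List String)) (memo : Option (List (String × Option (List String)))) (out : Option (List String)) : Prop := out = split_compound_alt word lookup memo
instance (word : String) (lookup : List (String × List String)) (memo : Option (List (String × Option (List String)))) (out : Option (List String)) : Decidable (Spec_split_compound word lookup memo out) := by unfold Spec_split_compound; infer_instance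

-- ===== CLAIM (what is proved, stated in full; the proofs are below) =====
def Claim_equal_split_compound : Prop := ∀ (word : String) (lookup : List (String × List String)) (memo : Option (List (String × Option (List String)))), Dom_split_compound word lookup memo → Spec_split_compound word lookup memo (split_compound word lookup memo)

-- ===== LEMMAS AND PROOFS =====

-- B's value on a suffix, as a function (head of the filled array)
def Vc (memo0 : List (String × Option (List String)))
    (lookup : List (String × List String)) (w : List Char) : Option (List String) :=
  (bestB memo0 lookup (jsB lookup) w).headD none

lemma mem_jsB_two (lookup : List (String × List String)) :
    ∀ j ∈ jsB lookup, 2 ≤ j := by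
  intro j hj
  rw [jsB, PySem.List.mem_sorted, PySem.Set.mem_ofList, List.mem_map] at hj
  obtain ⟨p, hp, rfl⟩ := hj
  exact of_decide_eq_true (List.mem_filter.mp hp).2

lemma jsB_pairwise (lookup : List (String × List String)) :
    (jsB lookup).Pairwise (· < ·) :=
  PySem.List.sorted_ofList_pairwise_lt _

lemma lookup_mem {α β : Type} [BEq α] [LawfulBEq α] {s : α} {v : β} {l : List (α × β)}
    (h : List.lookup s l = some v) : (s, v) ∈ l := by
  induction l with
  | nil => simp [List.lookup] at h
  | cons p rest ih =>
    cases p with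
    | mk a b =>
      by_cases hs : s == a
      · simp [List.lookup, hs] at h
        subst h
        simp [eq_of_beq hs]
      · simp [List.lookup, hs] at h
        exact List.mem_cons_of_mem _ (ih h)

lemma len_mem_jsB {lookup : List (String × List String)} {s : String} {v : List String}
    (h : List.lookup s lookup = some v) (h2 : 2 ≤ PySem.Str.len s) :
    PySem.Str.len s ∈ jsB lookup := by
  rw [jsB, PySem.List.mem_sorted, PySem.Set.mem_ofList, List.mem_map]
  exact ⟨(s, v), List.mem_filter.mpr ⟨lookup_mem h, by simpa using h2⟩, rfl⟩

lemma scanB_none_of_break (lookup : List (String × List String)) (suf : List Char)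
    (b : List (Option (List String))) (js : List Int)
    (h : ∀ j ∈ js, (suf.length : Int) - 2 < j) : scanB lookup suf b js = none := by
  cases js with
  | nil => rfl
  | cons j rest => simp [scanB, h j List.mem_cons_self]

lemma filter_ge_of_not_mem {l : List Int} {a : Int} (ha : a ∉ l) :
    l.filter (fun j => decide (a ≤ j)) = l.filter (fun j => decide (a + 1 ≤ j)) := by
  apply List.filter_congr
  intro j hj
  have : j ≠ a := fun h => ha (h ▸ hj)
  simp only [decide_eq_decide]
  omega

lemma filter_ge_of_mem {l : List Int} {a : Int} (hp : l.Pairwise (· < ·)) (ha : a ∈ l) :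
    l.filter (fun j => decide (a ≤ j)) = a :: l.filter (fun j => decide (a + 1 ≤ j)) := by
  induction l with
  | nil => simp at ha
  | cons x xs ih =>
    have hx : ∀ y ∈ xs, x < y := fun y hy => (List.pairwise_cons.mp hp).1 y hy
    by_cases hax : a = x
    · subst hax
      have hnotmem : a ∉ xs := fun hmem => absurd (hx a hmem) (lt_irrefl a)
      have h1 : xs.filter (fun j => decide (a ≤ j)) = xs.filter (fun j => decide (a + 1 ≤ j)) :=
        filter_ge_of_not_mem hnotmem
      simp only [List.filter_cons]
      have : decide (a ≤ a) = true := by simp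
      rw [this]
      have : decide (a + 1 ≤ a) = false := by simp
      rw [this]
      simp [h1]
    · have hmem : a ∈ xs := by
        cases List.mem_cons.mp ha with
        | inl h => exact absurd h hax
        | inr h => exact h
      have hxa : x < a := hx a hmem
      simp only [List.filter_cons]
      have h1 : decide (a ≤ x) = false := by simp; omega
      have h2 : decide (a + 1 ≤ x) = false := by simp; omega
      rw [h1, h2]
      exact ih (List.pairwise_cons.mp hp).2 hmem

-- pointwise unfolding of B's value: one cell equals entryB over the filled tail
lemma Vc_unfold (memo0 : List (String × Option (List String)))
    (lookup : List (String × List String)) (w : List Char) :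
    Vc memo0 lookup w = entryB memo0 lookup (jsB lookup) w (bestB memo0 lookup (jsB lookup) w.tail) := by
  cases w with
  | nil =>
    show entryB memo0 lookup (jsB lookup) [] [] =
      entryB memo0 lookup (jsB lookup) [] (bestB memo0 lookup (jsB lookup) [])
    unfold entryB
    rw [scanB_none_of_break lookup [] [] (jsB lookup)
      (fun j hj => by have := mem_jsB_two lookup j hj; simp; omega)]
    rw [scanB_none_of_break lookup [] (bestB memo0 lookup (jsB lookup) []) (jsB lookup)
      (fun j hj => by have := mem_jsB_two lookup j hj; simp; omega)]
  | cons c rest => rfl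

lemma Vc_of_memo (memo0 : List (String × Option (List String)))
    (lookup : List (String × List String)) (s : String) (v : Option (List String))
    (h : List.lookup s memo0 = some v) : Vc memo0 lookup s.toList = v := by
  rw [Vc_unfold]
  unfold entryB
  rw [String.ofList_toList, h]

lemma bestB_getD (memo0 : List (String × Option (List String)))
    (lookup : List (String × List String)) :
    ∀ (w : List Char) (k : Nat), k ≤ w.length →
      (bestB memo0 lookup (jsB lookup) w).getD k none = Vc memo0 lookup (w.drop k) := by
  intro w
  induction w with
  | nil => intro k hk; simp only [List.length_nil, Nat.le_zero] at hk; subst hk; rfl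
  | cons c rest ih =>
    intro k hk
    cases k with
    | zero => rfl
    | succ k => simpa [bestB] using ih k (by simpa using hk)

-- the invariant A's evolving memo satisfies: it extends the initial memo and every entry
-- holds B's value for its key
def MemoInv (memo0 : List (String × Option (List String)))
    (lookup : List (String × List String))
    (memo : List (String × Option (List String))) : Prop :=
  memo0 <+: memo ∧ ∀ s v, List.lookup s memo = some v → v = Vc memo0 lookup s.toList

lemma lookup_append_none {α β : Type} [BEq α] (s : α) (l₁ l₂ : List (α × β)) :
    List.lookup s (l₁ ++ l₂) =
      match List.lookup s l₁ with
      | some v => some v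
      | none => List.lookup s l₂ := by
  induction l₁ with
  | nil => simp [List.lookup]
  | cons p rest ih => cases p with | mk a b => by_cases h : s == a <;> simp [List.lookup, h, ih]

lemma MemoInv_append (memo0 : List (String × Option (List String)))
    (lookup : List (String × List String)) (memo : List (String × Option (List String)))
    (w : List Char) (v : Option (List String))
    (h : MemoInv memo0 lookup memo) (hv : v = Vc memo0 lookup w) :
    MemoInv memo0 lookup (memo ++ [(String.ofList w, v)]) := by
  obtain ⟨hpre, hent⟩ := h
  refine ⟨hpre.trans (List.prefix_append _ _), ?_⟩
  intro s u hu
  rw [lookup_append_none] at hu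
  cases hl : List.lookup s memo with
  | some u' => rw [hl] at hu; exact hent s u (by rw [hl, ← hu])
  | none =>
    rw [hl] at hu
    simp only [List.lookup] at hu
    by_cases hs : s == String.ofList w
    · simp [hs] at hu
      have : s = String.ofList w := by simpa using hs
      subst hu; rw [this, hv]; simp
    · simp [hs] at hu

lemma lookup_of_prefix {α β : Type} [BEq α] (s : α) {l₁ l₂ : List (α × β)}
    (h : l₁ <+: l₂) (hn : List.lookup s l₂ = none) : List.lookup s l₁ = none := by
  obtain ⟨t, rfl⟩ := h
  rw [lookup_append_none] at hn
  cases hl : List.lookup s l₁ with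
  | none => rfl
  | some v => rw [hl] at hn; exact hn

-- the main simulation, loop half: A scans every offset a, a+1, … while B scans only the
-- pending dictionary key lengths ≥ a; under the invariant both produce B's value
lemma loopA_spec (lookup : List (String × List String))
    (memo0 : List (String × Option (List String))) (fuel : Nat)
    (IH : ∀ (w : List Char) (memo : List (String × Option (List String))),
      w.length < fuel → MemoInv memo0 lookup memo →
      (splitA fuel w lookup memo).1 = Vc memo0 lookup w ∧
        MemoInv memo0 lookup (splitA fuel w lookup memo).2)
    (w : List Char) (hw : w.length ≤ fuel) :
    ∀ (is : List Int) (a : Int) (memo : List (String × Option (List String))),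
      2 ≤ a →
      is = PySem.List.pyRange a ((w.length : Int) - 1) 1 →
      MemoInv memo0 lookup memo →
      Vc memo0 lookup w = scanB lookup w (bestB memo0 lookup (jsB lookup) w.tail)
        ((jsB lookup).filter (fun j => decide (a ≤ j))) →
      (loopA fuel w lookup memo is).1 = Vc memo0 lookup w ∧
        MemoInv memo0 lookup (loopA fuel w lookup memo is).2 := by
  intro is
  induction is with
  | nil =>
    intro a memo ha2 hrange hinv hVc
    have hend : (w.length : Int) - 1 ≤ a := by
      by_contra hlt
      rw [PySem.List.pyRange_one_cons (by omega)] at hrange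
      exact List.cons_ne_nil _ _ hrange.symm
    rw [scanB_none_of_break lookup w _ _ (fun j hj => by
      have := (List.mem_filter.mp hj).2
      have := of_decide_eq_true this
      omega)] at hVc
    simp only [loopA]
    exact ⟨hVc.symm, MemoInv_append memo0 lookup memo w none hinv hVc.symm⟩
  | cons i rest ih =>
    intro a memo ha2 hrange hinv hVc
    have hlt : a < (w.length : Int) - 1 := by
      by_contra hge
      rw [PySem.List.pyRange_one_eq_nil (by omega)] at hrange
      exact List.cons_ne_nil _ _ hrange
    rw [PySem.List.pyRange_one_cons hlt] at hrange
    obtain ⟨rfl, hrest⟩ : i = a ∧ rest = PySem.List.pyRange (a + 1) ((w.length : Int) - 1) 1 := by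
      exact ⟨(List.cons.injEq _ _ _ _ ▸ hrange).1, (List.cons.injEq _ _ _ _ ▸ hrange).2⟩
    have hlen4 : 4 ≤ w.length := by omega
    have hiN : 2 ≤ i.toNat ∧ i.toNat < w.length - 1 := by omega
    have hgetD : (bestB memo0 lookup (jsB lookup) w.tail).getD (i.toNat - 1) none =
        Vc memo0 lookup (w.drop i.toNat) := by
      rw [bestB_getD memo0 lookup w.tail (i.toNat - 1) (by rw [List.length_tail]; omega)]
      congr 1
      rw [← List.drop_one, List.drop_drop]
      congr 1
      omega
    simp only [loopA]
    cases hlk : List.lookup (String.ofList (w.take i.toNat)) lookup with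
    | none =>
      dsimp only
      -- A skips this offset; B's pending scan is unchanged (i either fails the same
      -- lookup inside scanB, or i is no dictionary key length and was never scanned)
      have hVc' : Vc memo0 lookup w = scanB lookup w (bestB memo0 lookup (jsB lookup) w.tail)
          ((jsB lookup).filter (fun j => decide (i + 1 ≤ j))) := by
        by_cases hmem : i ∈ jsB lookup
        · rw [filter_ge_of_mem (jsB_pairwise lookup) hmem] at hVc
          rw [hVc]
          simp only [scanB]
          rw [if_neg (by omega), hlk]
        · rwa [filter_ge_of_not_mem hmem] at hVc
      exact ih (i + 1) memo (by omega) hrest hinv hVc'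
    | some lv =>
      have hmem : i ∈ jsB lookup := by
        have hlen : PySem.Str.len (String.ofList (w.take i.toNat)) = i := by
          rw [PySem.Str.len_eq]
          rw [String.toList_ofList]
          rw [List.length_take]
          omega
        have := len_mem_jsB hlk (by omega : (2:Int) ≤ PySem.Str.len (String.ofList (w.take i.toNat)))
        rwa [hlen] at this
      rw [filter_ge_of_mem (jsB_pairwise lookup) hmem] at hVc
      simp only [scanB] at hVc
      rw [if_neg (by omega), hlk, hgetD] at hVc
      have hrlen : (w.drop i.toNat).length < fuel := by
        rw [List.length_drop]; omega
      obtain ⟨hr1, hr2⟩ := IH (w.drop i.toNat) memo hrlen hinv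
      cases hsp : splitA fuel (w.drop i.toNat) lookup memo with
      | mk r memo' =>
        rw [hsp] at hr1 hr2
        simp only at hr1 hr2
        dsimp only
        subst hr1
        cases hrv : Vc memo0 lookup (w.drop i.toNat) with
        | some ph =>
          rw [hrv] at hVc
          dsimp only at hVc ⊢
          exact ⟨hVc.symm, MemoInv_append memo0 lookup memo' w _ hr2 hVc.symm⟩
        | none =>
          rw [hrv] at hVc
          dsimp only at hVc ⊢
          exact ih (i + 1) memo' (by omega) hrest hr2 hVc

-- the main simulation: under the invariant, A returns B's value and preserves the invariant
lemma main_spec (lookup : List (String × List String))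
    (memo0 : List (String × Option (List String))) :
    ∀ (fuel : Nat) (w : List Char) (memo : List (String × Option (List String))),
      w.length < fuel → MemoInv memo0 lookup memo →
      (splitA fuel w lookup memo).1 = Vc memo0 lookup w ∧
        MemoInv memo0 lookup (splitA fuel w lookup memo).2 := by
  intro fuel
  induction fuel with
  | zero => intro w memo h; omega
  | succ fuel IH =>
    intro w memo hlen hinv
    simp only [splitA]
    cases hm : List.lookup (String.ofList w) memo with
    | some v =>
      dsimp only
      have := hinv.2 (String.ofList w) v hm
      rw [String.toList_ofList] at this
      exact ⟨this, hinv⟩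
    | none =>
      have hm0 : List.lookup (String.ofList w) memo0 = none :=
        lookup_of_prefix _ hinv.1 hm
      cases hl : List.lookup (String.ofList w) lookup with
      | some v =>
        dsimp only
        have hVc : Vc memo0 lookup w = some v := by
          rw [Vc_unfold]; unfold entryB; rw [hm0, hl]
        exact ⟨hVc.symm, MemoInv_append memo0 lookup memo w _ hinv hVc.symm⟩
      | none =>
        dsimp only
        have hfull : (jsB lookup).filter (fun j => decide ((2:Int) ≤ j)) = jsB lookup := by
          rw [List.filter_eq_self]
          intro j hj
          exact decide_eq_true (mem_jsB_two lookup j hj)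
        have hVc : Vc memo0 lookup w = scanB lookup w (bestB memo0 lookup (jsB lookup) w.tail)
            ((jsB lookup).filter (fun j => decide ((2:Int) ≤ j))) := by
          rw [Vc_unfold]; unfold entryB; rw [hm0, hl, hfull]
        exact loopA_spec lookup memo0 fuel IH w (by omega)
          (PySem.List.pyRange 2 ((w.length : Int) - 1) 1) 2 memo (by omega) rfl hinv hVc

theorem equal_all : ∀ (word : String) (lookup : List (String × List String))
    (memo : Option (List (String × Option (List String)))),
    split_compound word lookup memo = split_compound_alt word lookup memo := by
  intro word lookup memo
  have h := main_spec lookup (memo.getD []) (word.toList.length + 1) word.toList (memo.getD [])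
    (by omega) ?_
  · exact h.1
  · exact ⟨List.prefix_refl _, fun s v hv => (Vc_of_memo _ lookup s v hv).symm⟩

-- ===== VERDICT (by name: the statement is the Claim_ definition above) =====
theorem split_compound_spec : Claim_equal_split_compound := by
  intro word lookup memo _
  unfold Spec_split_compound
  exact equal_all word lookup memo
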